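-- pv_equiv track=rewrite | github.com/vigneshcj001/Glycan_AI | src/Backend/generate_vocab.py | motif_find
-- ===== SOURCE A (Python) =====
-- def motif_find(s):
--   """converts a IUPACcondensed-ish glycan into a list of overlapping, asterisk-separated glycowords"""
--   b = s.split('(')
--   b = [k.split(')') for k in b]
--   b = [item for sublist in b for item in sublist]
--   b = [k.strip('[') for k in b]
--   b = [k.strip(']') for k in b]
--   b = [k.replace('[', '') for k in b]
--   b = [k.replace(']', '') for k in b]
--   b = ['*'.join(b[i:i+5]) for i in range(0, len(b)-4, 2)]
--   return b
-- ===== SOURCE B (Python) =====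
-- def motif_find(s):
--   """converts a IUPACcondensed-ish glycan into a list of overlapping, asterisk-separated glycowords"""
--   toks = []
--   cur = []
--   for ch in s:
--     if ch in '()':
--       toks.append(''.join(cur))
--       cur = []
--     elif ch not in '[]':
--       cur.append(ch)
--   toks.append(''.join(cur))
--   return ['*'.join(toks[i:i+5]) for i in range(0, len(toks)-4, 2)]
-- ===== Notes on version B (the rewrite author's own statement) =====
-- stated objective: simpler
-- what changed: Replaced the seven-stage split/flatten/strip/replace list pipeline with one explicit pass over the characters that skips brackets and cuts tokens at parentheses, keeping the final window comprehension.
import Mathlib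
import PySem

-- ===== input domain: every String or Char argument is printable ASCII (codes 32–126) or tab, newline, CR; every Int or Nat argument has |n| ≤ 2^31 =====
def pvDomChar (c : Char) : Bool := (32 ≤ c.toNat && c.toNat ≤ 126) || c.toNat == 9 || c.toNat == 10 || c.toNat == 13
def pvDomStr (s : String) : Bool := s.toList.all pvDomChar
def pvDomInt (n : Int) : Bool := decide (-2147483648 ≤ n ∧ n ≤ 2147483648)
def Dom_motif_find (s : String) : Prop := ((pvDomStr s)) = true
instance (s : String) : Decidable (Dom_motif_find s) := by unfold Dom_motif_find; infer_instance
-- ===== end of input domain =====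

-- B replaces A's seven-stage split/flatten/strip/replace pipeline by a single explicit character pass (simpler decomposition, same cost).

-- ===== PORT A =====
def motif_find (s : String) : List String :=
  let b1 := PySem.Chars.splitOn s.toList ['(']
  let b2 := (b1.map (fun k => PySem.Chars.splitOn k [')'])).flatten
  let b3 := b2.map (fun k => PySem.Chars.stripChars k ['['])
  let b4 := b3.map (fun k => PySem.Chars.stripChars k [']'])
  let b5 := b4.map (fun k => PySem.Chars.replace k ['['] [])
  let b6 := b5.map (fun k => PySem.Chars.replace k [']'] [])
  (PySem.List.pyRange 0 ((b6.length : Int) - 4) 2).map (fun i =>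
    String.ofList (PySem.Chars.join ['*'] (PySem.List.slice b6 (some i) (some (i + 5)))))

-- ===== PORT B =====
def motif_find_alt (s : String) : List String :=
  let p := s.toList.foldl (fun (st : List (List Char) × List Char) c =>
      if c = '(' ∨ c = ')' then (st.1 ++ [st.2], [])
      else if ¬ (c = '[' ∨ c = ']') then (st.1, st.2 ++ [c])
      else st) ([], [])
  let toks := p.1 ++ [p.2]
  (PySem.List.pyRange 0 ((toks.length : Int) - 4) 2).map (fun i =>
    String.ofList (PySem.Chars.join ['*'] (PySem.List.slice toks (some i) (some (i + 5)))))

-- ===== PRECONDITION & SPEC =====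
def Spec_motif_find (s : String) (out : List String) : Prop := out = motif_find_alt s
instance (s : String) (out : List String) : Decidable (Spec_motif_find s out) := by unfold Spec_motif_find; infer_instance

-- ===== CLAIM (what is proved, stated in full; the proofs are below) =====
def Claim_equal_motif_find : Prop := ∀ (s : String), Dom_motif_find s → Spec_motif_find s (motif_find s)

-- ===== LEMMAS AND PROOFS =====

-- prepend a char to the first piece (a split list is never empty; [] case unreachable)
def consH (c : Char) : List (List Char) → List (List Char)
  | [] => [[c]]
  | x :: xs => (c :: x) :: xs

-- split on a single character, defined structurally
def splitChar (d : Char) : List Char → List (List Char)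
  | [] => [[]]
  | c :: t => if c = d then [] :: splitChar d t else consH c (splitChar d t)

lemma splitChar_ne_nil (d : Char) (l : List Char) : splitChar d l ≠ [] := by
  cases l with
  | nil => simp [splitChar]
  | cons c t =>
    simp only [splitChar]
    split_ifs
    · simp
    · cases h : splitChar d t <;> simp [consH]

lemma splitOn_go_singleton (d : Char) (fuel : Nat) (l cur : List Char)
    (acc : List (List Char)) (h : l.length ≤ fuel) :
    PySem.Chars.splitOn.go [d] fuel l cur acc =
      acc.reverse ++ (match splitChar d l with
                      | [] => [cur.reverse]
                      | x :: xs => (cur.reverse ++ x) :: xs) := by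
  induction fuel generalizing l cur acc with
  | zero =>
    have : l = [] := by cases l <;> simp_all
    subst this
    simp [PySem.Chars.splitOn.go, splitChar]
  | succ n ih =>
    cases l with
    | nil => simp [PySem.Chars.splitOn.go, splitChar]
    | cons c t =>
      simp only [PySem.Chars.splitOn.go]
      by_cases hc : c = d
      · subst hc
        have hp : [c].isPrefixOf (c :: t) = true := by simp [List.isPrefixOf]
        simp only [hp, if_true, List.length_cons, List.drop_succ_cons, List.length_nil, List.drop_zero]
        rw [ih t [] (cur.reverse :: acc) (Nat.le_of_succ_le_succ (by simpa using h))]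
        simp only [splitChar]
        cases hs : splitChar c t with
        | nil => exact absurd hs (splitChar_ne_nil c t)
        | cons x xs => simp
      · have hp : [d].isPrefixOf (c :: t) = false := by
          simp only [List.isPrefixOf, Bool.and_eq_false_iff, beq_eq_false_iff_ne, ne_eq]
          exact Or.inl (fun hh => hc hh.symm)
        simp only [hp, Bool.false_eq_true, if_false]
        rw [ih t (c :: cur) acc (Nat.le_of_succ_le_succ (by simpa using h))]
        simp only [splitChar, if_neg hc]
        cases hs : splitChar d t with
        | nil => exact absurd hs (splitChar_ne_nil d t)
        | cons x xs => simp [consH]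

lemma splitOn_singleton (d : Char) (l : List Char) :
    PySem.Chars.splitOn l [d] = splitChar d l := by
  unfold PySem.Chars.splitOn
  rw [splitOn_go_singleton d (l.length + 1) l [] [] (by omega)]
  cases hs : splitChar d l with
  | nil => exact absurd hs (splitChar_ne_nil d l)
  | cons x xs => simp

-- replace [d] [] is a filter
lemma replace_go_singleton (d : Char) (fuel : Nat) (l acc : List Char) (h : l.length ≤ fuel) :
    PySem.Chars.replace.go [d] [] fuel l acc =
      acc.reverse ++ l.filter (fun c => !(c == d)) := by
  induction fuel generalizing l acc with
  | zero =>
    have : l = [] := by cases l <;> simp_all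
    subst this
    simp [PySem.Chars.replace.go]
  | succ n ih =>
    cases l with
    | nil => simp [PySem.Chars.replace.go]
    | cons c t =>
      simp only [PySem.Chars.replace.go]
      by_cases hc : c = d
      · subst hc
        have hp : [c].isPrefixOf (c :: t) = true := by simp [List.isPrefixOf]
        simp only [hp, if_true, List.length_cons, List.drop_succ_cons, List.length_nil, List.drop_zero,
          List.reverse_nil, List.nil_append]
        rw [ih t acc (Nat.le_of_succ_le_succ (by simpa using h))]
        simp [List.filter]
      · have hp : [d].isPrefixOf (c :: t) = false := by
          simp only [List.isPrefixOf, Bool.and_eq_false_iff, beq_eq_false_iff_ne, ne_eq]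
          exact Or.inl (fun hh => hc hh.symm)
        simp only [hp, Bool.false_eq_true, if_false]
        rw [ih t (c :: acc) (Nat.le_of_succ_le_succ (by simpa using h))]
        simp [hc]

lemma replace_singleton (d : Char) (l : List Char) :
    PySem.Chars.replace l [d] [] = l.filter (fun c => !(c == d)) := by
  unfold PySem.Chars.replace
  simp only [List.isEmpty_cons, Bool.false_eq_true, if_false]
  exact replace_go_singleton d l.length l [] le_rfl

-- filter absorbs dropWhile on chars it rejects
lemma filter_dropWhile (p q : Char → Bool) (l : List Char) (h : ∀ c, p c = true → q c = false) :
    (l.dropWhile p).filter q = l.filter q := by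
  induction l with
  | nil => rfl
  | cons c t ih =>
    by_cases hp : p c = true
    · simp [hp, h c hp, ih]
    · simp [hp]

-- filter absorbs stripChars [d] when the filter rejects d
lemma filter_stripChars (q : Char → Bool) (d : Char) (l : List Char) (hd : q d = false) :
    (PySem.Chars.stripChars l [d]).filter q = l.filter q := by
  unfold PySem.Chars.stripChars
  dsimp only
  have habs : ∀ c : Char, [d].contains c = true → q c = false := by
    intro c hc
    simp only [List.contains_cons, List.elem_nil, Bool.or_false, beq_iff_eq] at hc
    subst hc; exact hd
  rw [List.filter_reverse, filter_dropWhile _ _ _ habs, List.filter_reverse,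
    filter_dropWhile _ _ _ habs, List.reverse_reverse]

-- the per-token cleanup of A (strip, strip, replace, replace) is one bracket-removing filter
def rmB (l : List Char) : List Char := l.filter (fun c => !(c == '[') && !(c == ']'))

lemma cleanup_eq_rmB (k : List Char) :
    PySem.Chars.replace
      (PySem.Chars.replace
        (PySem.Chars.stripChars (PySem.Chars.stripChars k ['[']) [']']) ['['] []) [']'] [] =
      rmB k := by
  rw [replace_singleton, replace_singleton, List.filter_filter,
    filter_stripChars _ ']' _ (by decide), filter_stripChars _ '[' _ (by decide)]
  unfold rmB
  apply List.filter_congr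
  intro a _
  exact Bool.and_comm _ _

-- tokenizer cutting at parentheses only
def tokP : List Char → List (List Char)
  | [] => [[]]
  | c :: t => if c = '(' ∨ c = ')' then [] :: tokP t else consH c (tokP t)

lemma tokP_ne_nil (l : List Char) : tokP l ≠ [] := by
  cases l with
  | nil => simp [tokP]
  | cons c t =>
    simp only [tokP]
    split_ifs
    · simp
    · cases h : tokP t <;> simp [consH]

-- single-pass tokenizer (B's): cut at parentheses, drop brackets
def tok : List Char → List (List Char)
  | [] => [[]]
  | c :: t =>
    if c = '(' ∨ c = ')' then [] :: tok t
    else if ¬ (c = '[' ∨ c = ']') then consH c (tok t)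
    else tok t

lemma tok_ne_nil (l : List Char) : tok l ≠ [] := by
  induction l with
  | nil => simp [tok]
  | cons c t ih =>
    simp only [tok]
    split_ifs
    · simp
    · exact ih
    · cases h : tok t <;> simp [consH]

-- two-level split flattens to the paren tokenizer
lemma splitSplit_eq_tokP (l : List Char) :
    ((splitChar '(' l).map (fun k => splitChar ')' k)).flatten = tokP l := by
  induction l with
  | nil => simp [splitChar, tokP]
  | cons c t ih =>
    by_cases h1 : c = '('
    · rw [show splitChar '(' (c :: t) = [] :: splitChar '(' t by simp [splitChar, h1],
        show tokP (c :: t) = [] :: tokP t by simp [tokP, h1]]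
      simp [splitChar, ih]
    · have hsp : splitChar '(' (c :: t) = consH c (splitChar '(' t) := by
        simp [splitChar, h1]
      cases hs : splitChar '(' t with
      | nil => exact absurd hs (splitChar_ne_nil '(' t)
      | cons x xs =>
        rw [hs] at hsp ih
        by_cases h2 : c = ')'
        · have htp : tokP (c :: t) = [] :: tokP t := by simp [tokP, h2]
          have hsp2 : splitChar ')' (c :: x) = [] :: splitChar ')' x := by
            simp [splitChar, h2]
          rw [hsp, htp, ← ih]
          simp [consH, hsp2]
        · have htp : tokP (c :: t) = consH c (tokP t) := by
            simp only [tokP]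
            rw [if_neg (by tauto)]
          have hsp2 : splitChar ')' (c :: x) = consH c (splitChar ')' x) := by
            simp [splitChar, h2]
          rw [hsp, htp, ← ih]
          simp only [consH, List.map_cons, List.flatten_cons, hsp2]
          cases hs2 : splitChar ')' x with
          | nil => exact absurd hs2 (splitChar_ne_nil ')' x)
          | cons y ys => simp

-- cleaning each paren token gives the single-pass tokens
lemma map_rmB_tokP (l : List Char) : (tokP l).map rmB = tok l := by
  induction l with
  | nil => simp [tokP, tok, rmB]
  | cons c t ih =>
    by_cases h1 : c = '(' ∨ c = ')'
    · rw [show tokP (c :: t) = [] :: tokP t by simp [tokP, h1],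
        show tok (c :: t) = [] :: tok t by simp [tok, h1]]
      simp [rmB, ih]
    · have htp : tokP (c :: t) = consH c (tokP t) := by
        simp only [tokP]
        rw [if_neg h1]
      cases hs : tokP t with
      | nil => exact absurd hs (tokP_ne_nil t)
      | cons x xs =>
        rw [hs] at htp ih
        by_cases h2 : c = '[' ∨ c = ']'
        · have htk : tok (c :: t) = tok t := by
            simp only [tok]
            rw [if_neg h1, if_neg (not_not_intro h2)]
          have hdrop : rmB (c :: x) = rmB x := by
            simp only [rmB, List.filter_cons]
            rcases h2 with h2 | h2 <;> subst h2 <;> simp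
          rw [htp, htk, ← ih]
          simp [consH, hdrop]
        · have htk : tok (c :: t) = consH c (tok t) := by
            simp only [tok]
            rw [if_neg h1, if_pos h2]
          have hkeep : rmB (c :: x) = c :: rmB x := by
            simp only [rmB, List.filter_cons]
            have hb : (!(c == '[') && !(c == ']')) = true := by
              simp only [Bool.and_eq_true, Bool.not_eq_true', beq_eq_false_iff_ne, ne_eq]
              exact ⟨fun hh => h2 (Or.inl hh), fun hh => h2 (Or.inr hh)⟩
            simp [hb]
          rw [htp, htk, ← ih]
          cases ht : tok t with
          | nil => exact absurd ht (tok_ne_nil t)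
          | cons z zs => simp [consH, hkeep]

-- B's fold computes tok (with an open token accumulator)
lemma foldl_tok (l : List Char) (toks : List (List Char)) (cur : List Char) :
    (l.foldl (fun (st : List (List Char) × List Char) c =>
        if c = '(' ∨ c = ')' then (st.1 ++ [st.2], [])
        else if ¬ (c = '[' ∨ c = ']') then (st.1, st.2 ++ [c])
        else st) (toks, cur)).1 ++
      [(l.foldl (fun (st : List (List Char) × List Char) c =>
        if c = '(' ∨ c = ')' then (st.1 ++ [st.2], [])
        else if ¬ (c = '[' ∨ c = ']') then (st.1, st.2 ++ [c])
        else st) (toks, cur)).2] =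
      toks ++ (match tok l with
               | [] => [cur]
               | x :: xs => (cur ++ x) :: xs) := by
  induction l generalizing toks cur with
  | nil => simp [tok]
  | cons c t ih =>
    simp only [List.foldl_cons]
    by_cases h1 : c = '(' ∨ c = ')'
    · simp only [if_pos h1]
      rw [ih (toks ++ [cur]) []]
      simp only [tok, if_pos h1]
      cases ht : tok t with
      | nil => exact absurd ht (tok_ne_nil t)
      | cons x xs => simp
    · by_cases h2 : c = '[' ∨ c = ']'
      · rw [if_neg h1, if_neg (not_not_intro h2), ih toks cur]
        simp only [tok]
        rw [if_neg h1, if_neg (not_not_intro h2)]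
      · rw [if_neg h1, if_pos h2, ih toks (cur ++ [c])]
        simp only [tok]
        rw [if_neg h1, if_pos h2]
        cases ht : tok t with
        | nil => exact absurd ht (tok_ne_nil t)
        | cons x xs => simp [consH]

-- the two ports build the same token list
lemma tokens_eq (s : String) :
    ((((((PySem.Chars.splitOn s.toList ['(']).map
        (fun k => PySem.Chars.splitOn k [')'])).flatten.map
        (fun k => PySem.Chars.stripChars k ['['])).map
        (fun k => PySem.Chars.stripChars k [']'])).map
        (fun k => PySem.Chars.replace k ['['] [])).map
        (fun k => PySem.Chars.replace k [']'] [])) =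
      (s.toList.foldl (fun (st : List (List Char) × List Char) c =>
          if c = '(' ∨ c = ')' then (st.1 ++ [st.2], [])
          else if ¬ (c = '[' ∨ c = ']') then (st.1, st.2 ++ [c])
          else st) ([], [])).1 ++
        [(s.toList.foldl (fun (st : List (List Char) × List Char) c =>
          if c = '(' ∨ c = ')' then (st.1 ++ [st.2], [])
          else if ¬ (c = '[' ∨ c = ']') then (st.1, st.2 ++ [c])
          else st) ([], [])).2] := by
  rw [foldl_tok s.toList [] []]
  simp only [List.map_map, List.nil_append]
  rw [splitOn_singleton]
  have hmap : (fun k => PySem.Chars.splitOn k [')']) = fun k => splitChar ')' k := by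
    funext k; exact splitOn_singleton ')' k
  rw [hmap]
  have hcomp :
      ((splitChar '(' s.toList).map fun k => splitChar ')' k).flatten.map
        ((fun k => PySem.Chars.replace k [']'] []) ∘ (fun k => PySem.Chars.replace k ['['] []) ∘
         (fun k => PySem.Chars.stripChars k [']']) ∘ fun k => PySem.Chars.stripChars k ['[']) =
      ((splitChar '(' s.toList).map fun k => splitChar ')' k).flatten.map rmB := by
    apply List.map_congr_left
    intro k _
    exact cleanup_eq_rmB k
  rw [hcomp, splitSplit_eq_tokP, map_rmB_tokP]
  cases ht : tok s.toList with
  | nil => exact absurd ht (tok_ne_nil s.toList)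
  | cons x xs => simp

-- ===== VERDICT (by name: the statement is the Claim_ definition above) =====
theorem motif_find_spec : Claim_equal_motif_find := by
  intro s _
  unfold Spec_motif_find motif_find motif_find_alt
  simp only []
  rw [tokens_eq s]
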